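-- pv_equiv track=rewrite | github.com/raphaelguterres/netguard-ids | reports/pdf_report.py | _top_threats
-- ===== SOURCE A (Python) =====
-- def _sev_score(sev: str) -> int:
--     return {"CRITICAL": 4, "HIGH": 3, "MEDIUM": 2, "LOW": 1, "INFO": 0}.get(sev.upper(), 0)
--
-- def _top_threats(events: list[dict], n: int = 10) -> list[tuple[str, int, str]]:
--     counts: dict[str, list] = {}
--     for e in events:
--         name = e.get("threat_name") or e.get("event_type") or "Desconhecido"
--         sev  = e.get("severity", "LOW").upper()
--         if name not in counts:
--             counts[name] = [0, sev]
--         counts[name][0] += 1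
--         if _sev_score(sev) > _sev_score(counts[name][1]):
--             counts[name][1] = sev
--     ranked = sorted(counts.items(), key=lambda x: x[1][0], reverse=True)[:n]
--     return [(name, data[0], data[1]) for name, data in ranked]
-- ===== SOURCE B (Python) =====
-- def _sev_score(sev: str) -> int:
--     return {"CRITICAL": 4, "HIGH": 3, "MEDIUM": 2, "LOW": 1, "INFO": 0}.get(sev.upper(), 0)
--
-- def _top_threats(events: list[dict], n: int = 10) -> list[tuple[str, int, str]]:
--     # Pass 1: group the (uppercased) severities by threat name.
--     groups: dict[str, list] = {}
--     for e in events: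
--         name = e.get("threat_name") or e.get("event_type") or "Desconhecido"
--         sev = e.get("severity", "LOW").upper()
--         groups.setdefault(name, []).append(sev)
--     # Pass 2: reduce each group; max returns the FIRST maximal severity.
--     triples = [(name, len(sevs), max(sevs, key=_sev_score)) for name, sevs in groups.items()]
--     return sorted(triples, key=lambda t: t[1], reverse=True)[:n]
-- ===== Notes on version B (the rewrite author's own statement) =====
-- stated objective: alternative
-- what changed: Replaces A's single-pass running (count, best-severity) accumulator dict with a two-pass collect-then-reduce: first group the uppercased severities per name, then compute (name, len(group), max(group, key=_sev_score)) and sort stably by count.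
import Mathlib
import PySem

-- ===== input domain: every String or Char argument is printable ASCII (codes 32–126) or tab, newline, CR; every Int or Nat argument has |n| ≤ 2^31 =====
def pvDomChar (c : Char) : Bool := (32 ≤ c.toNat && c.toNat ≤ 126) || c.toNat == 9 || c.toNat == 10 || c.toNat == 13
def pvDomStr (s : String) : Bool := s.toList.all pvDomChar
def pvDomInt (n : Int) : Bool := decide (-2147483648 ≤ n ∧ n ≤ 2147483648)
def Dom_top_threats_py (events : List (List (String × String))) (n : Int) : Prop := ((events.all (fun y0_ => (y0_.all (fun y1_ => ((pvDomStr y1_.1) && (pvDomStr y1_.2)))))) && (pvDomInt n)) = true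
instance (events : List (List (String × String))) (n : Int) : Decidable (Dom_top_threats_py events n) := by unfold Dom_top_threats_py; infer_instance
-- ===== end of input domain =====

-- B replaces A's single-pass running (count, best-severity) accumulator with a two-pass
-- collect-then-reduce (group severities per name, then len/max per group); alternative
-- decomposition, same cost.

-- ===== PORT A =====
-- _sev_score
def pvSevScore (sev : String) : Int :=
  (PySem.Dict.mk [("CRITICAL", (4 : Int)), ("HIGH", 3), ("MEDIUM", 2), ("LOW", 1), ("INFO", 0)]).getD
    (PySem.Str.upper sev) 0

-- Python's `x or y` on an optional string (falsy = missing or empty)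
def pvOrStr (o : Option String) (b : String) : String :=
  match o with
  | some s => if s = "" then b else s
  | none => b

-- e.get("threat_name") or e.get("event_type") or "Desconhecido"
def pvName (e : List (String × String)) : String :=
  pvOrStr ((PySem.Dict.mk e).get? "threat_name")
    (pvOrStr ((PySem.Dict.mk e).get? "event_type") "Desconhecido")

-- e.get("severity", "LOW").upper()
def pvSev (e : List (String × String)) : String :=
  PySem.Str.upper ((PySem.Dict.mk e).getD "severity" "LOW")

-- loop body of A
def pvStepA (counts : PySem.Dict String (Int × String)) (e : List (String × String)) :
    PySem.Dict String (Int × String) :=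
  let name := pvName e
  let sev := pvSev e
  let counts := if (counts.get? name).isNone then counts.insert name (0, sev) else counts
  let counts := counts.modify name (0, "") (fun p => (p.1 + 1, p.2))
  match counts.get? name with
  | some p => if pvSevScore sev > pvSevScore p.2 then counts.insert name (p.1, sev) else counts
  | none => counts  -- unreachable (key was just inserted); kept for totality

def top_threats_py (events : List (List (String × String))) (n : Int) : List (String × Int × String) :=
  let counts := events.foldl pvStepA PySem.Dict.empty
  let ranked := PySem.List.slice (PySem.List.sorted counts.items (fun x => x.2.1) true) none (some n)
  ranked.map (fun p => (p.1, p.2.1, p.2.2))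

-- ===== PORT B =====
-- max(sevs, key=_sev_score): first maximal element
def pvBest (sevs : List String) : String :=
  match sevs with
  | [] => ""  -- unreachable: groups only ever hold nonempty lists
  | h :: t => t.foldl (fun b x => if pvSevScore x > pvSevScore b then x else b) h

-- groups.setdefault(name, []).append(sev)
def pvStepB (groups : PySem.Dict String (List String)) (e : List (String × String)) :
    PySem.Dict String (List String) :=
  groups.modify (pvName e) [] (fun l => l ++ [pvSev e])

def top_threats_py_alt (events : List (List (String × String))) (n : Int) : List (String × Int × String) :=
  let groups := events.foldl pvStepB PySem.Dict.empty
  let triples := groups.items.map (fun p => (p.1, ((p.2.length : Int), pvBest p.2)))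
  PySem.List.slice (PySem.List.sorted triples (fun t => t.2.1) true) none (some n)

-- ===== PRECONDITION & SPEC =====
def Spec_top_threats_py (events : List (List (String × String))) (n : Int) (out : List (String × Int × String)) : Prop := out = top_threats_py_alt events n
instance (events : List (List (String × String))) (n : Int) (out : List (String × Int × String)) : Decidable (Spec_top_threats_py events n out) := by unfold Spec_top_threats_py; infer_instance

-- ===== CLAIM (what is proved, stated in full; the proofs are below) =====
def Claim_equal_top_threats_py : Prop := ∀ (events : List (List (String × String))) (n : Int), Dom_top_threats_py events n → Spec_top_threats_py events n (top_threats_py events n)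

-- ===== LEMMAS AND PROOFS =====
-- abstraction from a B-state entry to an A-state entry
def pvAbs (p : String × List String) : String × Int × String :=
  (p.1, ((p.2.length : Int), pvBest p.2))

theorem pvBest_append (s0 : String) (rest : List String) (sev : String) :
    pvBest ((s0 :: rest) ++ [sev]) =
      if pvSevScore sev > pvSevScore (pvBest (s0 :: rest)) then sev else pvBest (s0 :: rest) := by
  simp [pvBest, List.foldl_append]

theorem pvStepB_ne_nil (d : PySem.Dict String (List String)) (e : List (String × String))
    (h : ∀ p ∈ d.items, p.2 ≠ []) : ∀ p ∈ (pvStepB d e).items, p.2 ≠ [] := by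
  intro p hp
  simp only [pvStepB, PySem.Dict.modify, PySem.Dict.insert] at hp
  split at hp
  · simp only [List.mem_map] at hp
    obtain ⟨q, hq, rfl⟩ := hp
    split
    · simp
    · exact h q hq
  · simp only [List.mem_append, List.mem_singleton] at hp
    rcases hp with hp | hp
    · exact h p hp
    · subst hp; simp

theorem pvContains_eq_isSome {ν : Type} (items : List (String × ν)) (k : String) :
    (PySem.Dict.mk items).contains k = (List.find? (fun p => p.1 == k) items).isSome := by
  show (items.any fun p => p.1 == k) = _
  induction items with
  | nil => rfl
  | cons a t ih =>
    by_cases hb : (a.1 == k) = true <;> simp [hb, ih]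

theorem pvFind?_map_abs (k : String) (l : List (String × List String)) :
    List.find? (fun p => p.1 == k) (l.map pvAbs) =
      Option.map pvAbs (List.find? (fun p => p.1 == k) l) := by
  rw [List.find?_map]; rfl

theorem pvStep_comm (e : List (String × String)) (l : List (String × List String))
    (hne : ∀ p ∈ l, p.2 ≠ []) :
    pvStepA (PySem.Dict.mk (l.map pvAbs)) e = PySem.Dict.mk ((pvStepB (PySem.Dict.mk l) e).items.map pvAbs) := by
  have hget : ∀ (ν : Type) (items : List (String × ν)) (k : String),
      (PySem.Dict.mk items).get? k = Option.map (fun p => p.2) (List.find? (fun p => p.1 == k) items) :=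
    fun _ _ _ => rfl
  set name := pvName e with hname
  set sev := pvSev e with hsev
  cases h : List.find? (fun p => p.1 == name) l with
  | none =>
    -- name is a fresh key on both sides
    have hm : List.find? (fun p => p.1 == name) (l.map pvAbs) = none := by
      rw [pvFind?_map_abs, h]; rfl
    have hmne : ∀ p ∈ l.map pvAbs, ¬ (p.1 == name) = true := by
      rw [← List.find?_eq_none]; exact hm
    have hcont : (PySem.Dict.mk (l.map pvAbs)).contains name = false := by
      rw [pvContains_eq_isSome, hm]; rfl
    have hcontB : (PySem.Dict.mk l).contains name = false := by
      rw [pvContains_eq_isSome, h]; rfl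
    simp only [pvStepA, pvStepB, ← hname, ← hsev, hget, PySem.Dict.modify, PySem.Dict.getD, hm, h,
      Option.map_none, Option.isNone_none, if_pos, PySem.Dict.insert, hcont, hcontB,
      Bool.false_eq_true, if_false]
    -- after the fresh insert, the entry (name, (0, sev)) is appended
    have hfind1 : List.find? (fun p => p.1 == name) (l.map pvAbs ++ [(name, ((0 : Int), sev))]) =
        some (name, ((0 : Int), sev)) := by
      rw [List.find?_append]
      simp [hm]
    have hcont1 : (PySem.Dict.mk (l.map pvAbs ++ [(name, ((0 : Int), sev))])).contains name = true := by
      rw [pvContains_eq_isSome, hfind1]; rfl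
    simp only [hfind1, hcont1, Option.map_some, Option.getD_some, if_true]
    -- the replace-map touches only the appended entry
    have hrep : ∀ v : Int × String,
        (l.map pvAbs ++ [(name, ((0 : Int), sev))]).map
          (fun p => if p.1 == name then (name, v) else p) = l.map pvAbs ++ [(name, v)] := by
      intro v
      rw [List.map_append]
      congr 1
      · conv_rhs => rw [show l.map pvAbs = (l.map pvAbs).map id from (List.map_id _).symm]
        exact List.map_congr_left (fun p hp => by simp [hmne p hp])
      · simp
    rw [hrep]
    have hfind2 : List.find? (fun p => p.1 == name) (l.map pvAbs ++ [(name, ((0 : Int) + 1, sev))]) =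
        some (name, ((0 : Int) + 1, sev)) := by
      rw [List.find?_append]
      simp [hm]
    simp only [hfind2, Option.map_some]
    simp only [lt_irrefl, if_false]
    congr 1
    simp [pvAbs, pvBest]
  | some q =>
    have hq : (q.1 == name) = true := by simpa using List.find?_some h
    have hqe : q.1 = name := by simpa using hq
    have hqmem : q ∈ l := List.mem_of_find?_eq_some h
    have hq2 : q.2 ≠ [] := hne q hqmem
    set len : Int := (q.2.length : Int) with hlen
    set best : String := pvBest q.2 with hbest
    have hm : List.find? (fun p => p.1 == name) (l.map pvAbs) = some (q.1, (len, best)) := by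
      rw [pvFind?_map_abs, h]; rfl
    have hcontB : (PySem.Dict.mk l).contains name = true := by
      rw [pvContains_eq_isSome, h]; rfl
    simp only [pvStepA, pvStepB, ← hname, ← hsev, hget, PySem.Dict.modify, PySem.Dict.getD, hm, h,
      Option.map_some, Option.isNone_some, Bool.false_eq_true, if_false,
      Option.getD_some, PySem.Dict.insert, hcontB, if_true]
    have hcontM : (PySem.Dict.mk (l.map pvAbs)).contains name = true := by
      rw [pvContains_eq_isSome, hm]; rfl
    simp only [hcontM, if_true]
    -- find? after the replace-map yields the replaced entry
    have hfind1 : List.find? (fun p => p.1 == name)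
        ((l.map pvAbs).map (fun p => if p.1 == name then (name, (len + 1, best)) else p)) =
        some (name, (len + 1, best)) := by
      rw [List.find?_map]
      have hpred : ((fun p : String × Int × String => p.1 == name) ∘
          (fun p => if p.1 == name then (name, (len + 1, best)) else p)) =
          (fun p : String × Int × String => p.1 == name) := by
        funext p
        by_cases hb : (p.1 == name) = true <;> simp [Function.comp, hb]
      rw [hpred, hm]
      simp [hqe]
    simp only [hfind1, Option.map_some]
    have hcont2 : (PySem.Dict.mk
        ((l.map pvAbs).map (fun p => if p.1 == name then (name, (len + 1, best)) else p))).contains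
        name = true := by
      rw [pvContains_eq_isSome, hfind1]; rfl
    simp only [hcont2, if_true]
    -- unify the two branches and compare entrywise
    have hval : (len + 1, if pvSevScore sev > pvSevScore best then sev else best) =
        (((q.2 ++ [sev]).length : Int), pvBest (q.2 ++ [sev])) := by
      obtain ⟨s0, rest, hsr⟩ : ∃ s0 rest, q.2 = s0 :: rest := by
        cases hps : q.2 with
        | nil => exact absurd hps hq2
        | cons a b => exact ⟨a, b, rfl⟩
      rw [hbest, hlen, hsr, pvBest_append, Prod.mk.injEq]
      refine ⟨?_, rfl⟩
      simp
    by_cases hc : pvSevScore sev > pvSevScore best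
    · rw [if_pos hc]
      refine congrArg PySem.Dict.mk ?_
      simp only [List.map_map]
      refine List.map_congr_left (fun p hp => ?_)
      by_cases hb : p.1 = name
      · simp only [pvAbs, Function.comp_apply, beq_iff_eq, hb, if_true]
        simpa [hc] using congrArg (fun v : Int × String => (name, v.1, v.2)) hval
      · simp [pvAbs, hb]
    · rw [if_neg hc]
      refine congrArg PySem.Dict.mk ?_
      simp only [List.map_map]
      refine List.map_congr_left (fun p hp => ?_)
      by_cases hb : p.1 = name
      · simp only [pvAbs, Function.comp_apply, beq_iff_eq, hb, if_true]
        simpa [hc] using congrArg (fun v : Int × String => (name, v.1, v.2)) hval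
      · simp [pvAbs, hb]

theorem pvFold_comm (events : List (List (String × String))) (l : List (String × List String))
    (hne : ∀ p ∈ l, p.2 ≠ []) :
    events.foldl pvStepA (PySem.Dict.mk (l.map pvAbs)) =
      PySem.Dict.mk ((events.foldl pvStepB (PySem.Dict.mk l) ).items.map pvAbs) := by
  induction events generalizing l with
  | nil => rfl
  | cons e es ih =>
    simp only [List.foldl_cons]
    rw [pvStep_comm e l hne]
    have h2 := pvStepB_ne_nil (PySem.Dict.mk l) e hne
    have := ih (pvStepB (PySem.Dict.mk l) e).items h2
    simpa using this

-- ===== VERDICT (by name: the statement is the Claim_ definition above) =====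
theorem top_threats_py_spec : Claim_equal_top_threats_py := by
  intro events n _
  unfold Spec_top_threats_py top_threats_py top_threats_py_alt
  have h := pvFold_comm events [] (by simp)
  simp only [List.map_nil] at h
  rw [show (PySem.Dict.empty : PySem.Dict String (Int × String)) = PySem.Dict.mk [] from rfl,
      show (PySem.Dict.empty : PySem.Dict String (List String)) = PySem.Dict.mk [] from rfl, h]
  rw [show (fun p : String × List String => (p.1, ((p.2.length : Int), pvBest p.2))) = pvAbs from rfl]
  rw [show (fun p : String × Int × String => (p.1, p.2.1, p.2.2)) = id from funext (fun p => rfl)]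
  simp
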